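-- pv_equiv track=rewrite | github.com/skalskidaniel/tutoring-jagoda-ogieglo | matura-teoria/zadanie8_3.py | funkcja
-- ===== SOURCE A (Python) =====
-- def funkcja(n, s: str):
--     A = [None for _ in range(n+1)]
--     B = [None for _ in range(n+2)]
--     s = '%' + s # dodajemy cokolwiek z przodu aby indeksowanie bylo od 1
--     A[0] = 0
--     for i in range(1,n+1):
--         if s[i] == "a":
--             A[i] = A[i-1] + 1
--         else:
--             A[i] = A[i-1]
--     B[n+1] = 0
--     for j in range(n,0,-1):
--         if s[j] == "b":
--             B[j] = B[j+1] + 1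
--         else:
--             B[j] = B[j+1]
--     k = 1
--     for i in range(0,n+1):
--         if A[i] + B[i+1] > k:
--             k = A[i] + B[i+1]
--     return k
--
-- s = 'a' * 300 + "b" * 550 + 'a' * 300 + 'b' * 7 + 'a' * 280 + 'b' * 110
-- ===== SOURCE B (Python) =====
-- def funkcja(n, s: str):
--     d = 0
--     best = 0
--     total_b = 0
--     for i in range(n):
--         c = s[i]
--         if c == "a":
--             d += 1
--         elif c == "b":
--             d -= 1
--             total_b += 1
--         if d > best:
--             best = d
--     return max(1, total_b + best)
-- ===== Notes on version B (the rewrite author's own statement) =====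
-- stated objective: faster
-- what changed: Replaced A's two O(n) prefix/suffix counter arrays and a third scan over them by a single pass that keeps a running (#a - #b) difference, its running maximum and the total 'b' count, using the identity A[i]+B[i+1] = total_b + (prefix_a[i] - prefix_b[i]).
import Mathlib
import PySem

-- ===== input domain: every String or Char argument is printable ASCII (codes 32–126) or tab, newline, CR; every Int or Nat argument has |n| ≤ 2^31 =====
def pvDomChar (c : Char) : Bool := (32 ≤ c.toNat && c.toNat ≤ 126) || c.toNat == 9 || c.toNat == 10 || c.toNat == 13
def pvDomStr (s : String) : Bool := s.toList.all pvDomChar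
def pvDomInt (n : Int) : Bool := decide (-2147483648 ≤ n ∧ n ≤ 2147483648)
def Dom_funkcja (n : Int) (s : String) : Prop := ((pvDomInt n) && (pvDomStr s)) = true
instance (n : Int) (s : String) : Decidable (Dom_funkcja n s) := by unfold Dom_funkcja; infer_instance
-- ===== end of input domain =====

-- B replaces A's two O(n) index arrays and third scan by one single pass keeping a running
-- (#a − #b) difference, its maximum, and the total 'b' count (simpler: no arrays, one loop).

-- ===== PORT A =====
-- loop body of A's first loop: A[i] = A[i-1] + (1 if s[i]=='a' else 0), array kept as the list [A_0..A_i]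
def pvStepA (cs : List Char) (acc : List Int) (i : Int) : List Int :=
  let prev := acc.getLastD 0
  if PySem.List.pyGetD cs i '?' = 'a' then acc ++ [prev + 1] else acc ++ [prev]

-- loop body of A's second loop (j counts down): B[j] = B[j+1] + (1 if s[j]=='b' else 0),
-- the filled suffix of the array kept as the list [B_j..B_{n+1}] (prepending = writing at index j)
def pvStepB (cs : List Char) (acc : List Int) (j : Int) : List Int :=
  let nxt := acc.headD 0
  if PySem.List.pyGetD cs j '?' = 'b' then (nxt + 1) :: acc else nxt :: acc

def funkcja (n : Int) (s : String) : Int :=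
  let cs : List Char := '%' :: s.toList   -- s = '%' + s  (1-based indexing)
  let Aarr : List Int := (PySem.List.pyRange 1 (n + 1) 1).foldl (pvStepA cs) [0]
  -- Barr = [B_1, …, B_{n+1}]; the unread cell B[0] (= None) is represented by a dummy 0 in front below
  let Barr : List Int := (PySem.List.pyRange n 0 (-1)).foldl (pvStepB cs) [0]
  (PySem.List.pyRange 0 (n + 1) 1).foldl
    (fun k i =>
      if PySem.List.pyGetD Aarr i 0 + PySem.List.pyGetD (0 :: Barr) (i + 1) 0 > k
      then PySem.List.pyGetD Aarr i 0 + PySem.List.pyGetD (0 :: Barr) (i + 1) 0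
      else k) 1

-- ===== PORT B =====
-- loop body of B: update (d, best, total_b) with one character
def pvAltStep (st : Int × Int × Int) (c : Char) : Int × Int × Int :=
  let p := if c = 'a' then (st.1 + 1, st.2.1, st.2.2)
           else if c = 'b' then (st.1 - 1, st.2.1, st.2.2 + 1)
           else st
  (p.1, if p.1 > p.2.1 then p.1 else p.2.1, p.2.2)

def funkcja_alt (n : Int) (s : String) : Int :=
  let cs := s.toList
  let st := (PySem.List.pyRange 0 n 1).foldl
    (fun st i => pvAltStep st (PySem.List.pyGetD cs i '?')) (0, 0, 0)
  max 1 (st.2.2 + st.2.1)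

-- ===== PRECONDITION & SPEC =====
-- A raises IndexError when n < 0 (A[0] = 0 on an empty array) or n > len(s) (s[i] out of range)
def Pre_funkcja (n : Int) (s : String) : Prop := 0 ≤ n ∧ n ≤ (s.toList.length : Int)
instance (n : Int) (s : String) : Decidable (Pre_funkcja n s) := by unfold Pre_funkcja; infer_instance
def pvWitness_funkcja : Int × String := (2, "ab")

def Spec_funkcja (n : Int) (s : String) (out : Int) : Prop := out = funkcja_alt n s
instance (n : Int) (s : String) (out : Int) : Decidable (Spec_funkcja n s out) := by unfold Spec_funkcja; infer_instance

-- ===== CLAIM (what is proved, stated in full; the proofs are below) =====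
def Claim_equal_funkcja : Prop := ∀ (n : Int) (s : String), Dom_funkcja n s → Pre_funkcja n s → Spec_funkcja n s (funkcja n s)

-- ===== LEMMAS AND PROOFS =====

def pvCA (t : List Char) : Int := (t.count 'a' : Int)
def pvCB (t : List Char) : Int := (t.count 'b' : Int)
def pvD (t : List Char) (i : Nat) : Int := pvCA (t.take i) - pvCB (t.take i)
def pvBest (t : List Char) : Int := ((List.range (t.length + 1)).map (pvD t)).foldl (fun m x => max m x) 0

theorem pv_lemA (cs : List Char) (N : Nat) (h : N ≤ cs.length) :
    (PySem.List.pyRange 1 ((N : Int) + 1) 1).foldl (pvStepA ('%' :: cs)) [0]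
      = (List.range (N + 1)).map (fun i => pvCA (cs.take i)) := by
  induction N with
  | zero =>
    simp [PySem.List.pyRange_one_eq_nil, pvCA]
  | succ N ih =>
    have h' : N ≤ cs.length := Nat.le_of_succ_le h
    have hsplit : PySem.List.pyRange 1 (((N : Int) + 1) + 1) 1
        = PySem.List.pyRange 1 ((N : Int) + 1) 1 ++ [(N : Int) + 1] :=
      PySem.List.pyRange_one_succ_right (by omega)
    rw [show (((N + 1 : Nat)) : Int) + 1 = ((N : Int) + 1) + 1 by push_cast; ring,
        hsplit, List.foldl_append, ih h']
    have hget : PySem.List.pyGetD ('%' :: cs) ((N : Int) + 1) '?' = cs[N] := by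
      rw [show ((N : Int) + 1) = (((N + 1 : Nat)) : Int) by push_cast; ring,
          PySem.List.pyGetD_natCast]
      simp only [List.getD]
      rw [List.getElem?_eq_getElem (by simp; omega)]
      rfl
    have hlast : ((List.range (N + 1)).map (fun i => pvCA (cs.take i))).getLastD 0
        = pvCA (cs.take N) := by
      rw [List.range_succ, List.map_append]
      simp
    have htake : cs.take (N + 1) = cs.take N ++ [cs[N]] := by
      rw [List.take_add_one, List.getElem?_eq_getElem (by omega)]
      rfl
    have hcount : pvCA (cs.take (N + 1)) = pvCA (cs.take N) + (if cs[N] = 'a' then 1 else 0) := by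
      rw [htake]
      simp only [pvCA, List.count_append, List.count_singleton]
      by_cases hc : cs[N] = 'a' <;> simp [hc]
    rw [List.range_succ (n := N + 1), List.map_append]
    unfold pvStepA
    simp only [List.foldl_cons, List.foldl_nil]
    try dsimp only
    rw [hget, hlast]
    by_cases hc : cs[N] = 'a' <;> simp [hc, hcount]
theorem pv_lemBaux (cs : List Char) (N : Nat) (hN : N ≤ cs.length) (m : Nat) (hm : m ≤ N) :
    (PySem.List.pyRange (m : Int) 0 (-1)).foldl (pvStepB ('%' :: cs))
        ((List.range' m (N + 1 - m)).map (fun j => pvCB ((cs.take N).drop j)))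
      = (List.range' 0 (N + 1)).map (fun j => pvCB ((cs.take N).drop j)) := by
  induction m with
  | zero =>
    simp [PySem.List.pyRange_neg_one_eq_nil]
  | succ m ih =>
    have hm' : m ≤ N := Nat.le_of_succ_le hm
    have hcons : PySem.List.pyRange ((m + 1 : Nat) : Int) 0 (-1)
        = ((m + 1 : Nat) : Int) :: PySem.List.pyRange (((m + 1 : Nat) : Int) - 1) 0 (-1) :=
      PySem.List.pyRange_neg_one_cons (by push_cast; omega)
    rw [hcons, List.foldl_cons, show N + 1 - (m + 1) = N - m by omega]
    have hrr : List.range' m (N + 1 - m) = m :: List.range' (m + 1) (N - m) := by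
      rw [show N + 1 - m = (N - m) + 1 by omega, List.range'_succ]
    have hstep : pvStepB ('%' :: cs)
        ((List.range' (m + 1) (N - m)).map (fun j => pvCB ((cs.take N).drop j))) ((m + 1 : Nat) : Int)
        = (List.range' m (N + 1 - m)).map (fun j => pvCB ((cs.take N).drop j)) := by
      have hne : N - m = (N - (m + 1)) + 1 := by omega
      have hhead : ((List.range' (m + 1) (N - m)).map (fun j => pvCB ((cs.take N).drop j))).headD 0
          = pvCB ((cs.take N).drop (m + 1)) := by
        rw [hne, List.range'_succ]; simp
      have hget : PySem.List.pyGetD ('%' :: cs) ((m + 1 : Nat) : Int) '?' = cs[m]'(by omega) := by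
        rw [PySem.List.pyGetD_natCast]
        simp [List.getD, show m < cs.length by omega]
      have hdrop : (cs.take N).drop m = cs[m]'(by omega) :: (cs.take N).drop (m + 1) := by
        have hlen : m < (cs.take N).length := by simp [Nat.lt_of_lt_of_le (by omega : m < N) hN]; omega
        rw [List.drop_eq_getElem_cons hlen]
        congr 1
        simp [List.getElem_take]
      simp only [pvStepB, hget, hhead, hrr, List.map_cons]
      by_cases hc : cs[m]'(by omega) = 'b' <;>
        simp [hc, hdrop, pvCB]
    rw [hstep, show (((m + 1 : Nat) : Int) - 1) = ((m : Nat) : Int) by push_cast; ring,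
        show List.range' m (N + 1 - m) = List.range' m (N + 1 - m) from rfl, ih hm']
theorem pv_lemB (cs : List Char) (N : Nat) (hN : N ≤ cs.length) :
    (PySem.List.pyRange (N : Int) 0 (-1)).foldl (pvStepB ('%' :: cs)) [0]
      = (List.range (N + 1)).map (fun j => pvCB ((cs.take N).drop j)) := by
  have hinit : ([0] : List Int)
      = (List.range' N (N + 1 - N)).map (fun j => pvCB ((cs.take N).drop j)) := by
    have : N + 1 - N = 1 := by omega
    rw [this]
    simp [pvCB, List.drop_eq_nil_of_le, List.length_take]
  rw [hinit, pv_lemBaux cs N hN N le_rfl, List.range_eq_range']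

theorem pv_lemFoldRange {β : Type} (f : β → Int → β) (N : Nat) (a : β) :
    (PySem.List.pyRange 0 (N : Int) 1).foldl f a
      = (List.range N).foldl (fun k i => f k ((i : Nat) : Int)) a := by
  rw [PySem.List.pyRange_one]
  simp [List.foldl_map]

theorem pv_lemMaxFold (xs : List Int) (c : Int) :
    ∀ (a b : Int), xs.foldl (fun k x => if c + x > k then c + x else k) (max a (c + b))
      = max a (c + xs.foldl (fun m x => max m x) b) := by
  induction xs with
  | nil => intro a b; simp
  | cons x xs ih =>
    intro a b
    simp only [List.foldl_cons]
    have h1 : (if c + x > max a (c + b) then c + x else max a (c + b)) = max a (c + max b x) := by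
      rcases le_total b x with h | h <;> rcases le_total (c + x) (max a (c + b)) with h2 | h2 <;>
        simp [max_def] at * <;> split_ifs <;> omega
    rw [h1, ih a (max b x)]

theorem pv_lemAlt (t : List Char) :
    t.foldl pvAltStep (0, 0, 0) = (pvD t t.length, pvBest t, pvCB t) := by
  induction t using List.reverseRecOn with
  | nil => simp [pvD, pvBest, pvCA, pvCB]
  | append_singleton t c ih =>
    rw [List.foldl_append, ih]
    have htake : ∀ i, i ≤ t.length → (t ++ [c]).take i = t.take i := by
      intro i hi; rw [List.take_append_of_le_length hi]
    have hD : ∀ i, i ≤ t.length → pvD (t ++ [c]) i = pvD t i := by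
      intro i hi; simp [pvD, pvCA, pvCB, htake i hi]
    have hDlast : pvD (t ++ [c]) (t.length + 1)
        = pvD t t.length + (if c = 'a' then 1 else 0) - (if c = 'b' then 1 else 0) := by
      simp only [pvD, pvCA, pvCB]
      rw [List.take_of_length_le (by simp), List.take_of_length_le (by simp)]
      by_cases h1 : c = 'a' <;> by_cases h2 : c = 'b' <;>
        simp_all [List.count_append] <;> try ring
    have hBest : pvBest (t ++ [c]) = max (pvBest t) (pvD (t ++ [c]) (t.length + 1)) := by
      simp only [pvBest, List.length_append, List.length_cons, List.length_nil]
      rw [List.range_succ (n := t.length + 1), List.map_append, List.foldl_append]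
      have hmap : (List.range (t.length + 1)).map (pvD (t ++ [c]))
          = (List.range (t.length + 1)).map (pvD t) :=
        List.map_congr_left (fun i hi => hD i (Nat.lt_succ_iff.mp (List.mem_range.mp hi)))
      rw [hmap]
      simp
    have hCB : pvCB (t ++ [c]) = pvCB t + (if c = 'b' then 1 else 0) := by
      by_cases h2 : c = 'b' <;> simp [pvCB, List.count_append, h2]
    have hlen : (t ++ [c]).length = t.length + 1 := by simp
    rw [hlen, hBest, hDlast, hCB]
    unfold pvAltStep
    by_cases h1 : c = 'a'
    · simp [h1, Prod.ext_iff, max_def]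
      split_ifs <;> omega
    · by_cases h2 : c = 'b'
      · simp [h2, Prod.ext_iff, max_def]
        split_ifs <;> omega
      · simp [h1, h2, Prod.ext_iff, max_def]
        split_ifs <;> omega

theorem pv_alt_closed (n : Int) (s : String) (h0 : 0 ≤ n) (hle : n ≤ (s.toList.length : Int)) :
    funkcja_alt n s = max 1 (pvCB (s.toList.take n.toNat) + pvBest (s.toList.take n.toNat)) := by
  set cs := s.toList with hcs
  set N := n.toNat with hN
  have hn : n = (N : Int) := by omega
  have hNlen : N ≤ cs.length := by omega
  set t := cs.take N with ht
  have htlen : t.length = N := by simp [ht, hNlen]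
  unfold funkcja_alt
  rw [← hcs, hn]
  dsimp only
  rw [pv_lemFoldRange]
  try dsimp only
  have hsteps : (List.range N).foldl
      (fun st i => pvAltStep st (PySem.List.pyGetD cs ((i : Nat) : Int) '?')) (0, 0, 0)
      = t.foldl pvAltStep (0, 0, 0) := by
    have hcongr : (List.range N).foldl
        (fun st i => pvAltStep st (PySem.List.pyGetD cs ((i : Nat) : Int) '?')) (0, 0, 0)
        = (List.range N).foldl (fun st i => pvAltStep st (t.getD i '?')) (0, 0, 0) := by
      apply PySem.List.foldl_congr_mem
      intro acc x hx
      have hxN : x < N := List.mem_range.mp hx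
      rw [PySem.List.pyGetD_natCast]
      congr 1
      simp [List.getD, ht, hxN,
            (List.getElem?_eq_getElem (by omega : x < cs.length))]
    rw [hcongr]
    clear hcongr
    rw [← htlen]
    generalize t = u
    induction u using List.reverseRecOn with
    | nil => simp
    | append_singleton u c ihu =>
      rw [List.length_append, List.length_cons, List.length_nil, List.range_succ,
          List.foldl_append, List.foldl_append]
      have hcg : (List.range u.length).foldl
          (fun st i => pvAltStep st ((u ++ [c]).getD i '?')) (0, 0, 0)
          = (List.range u.length).foldl (fun st i => pvAltStep st (u.getD i '?')) (0, 0, 0) := by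
        apply PySem.List.foldl_congr_mem
        intro acc x hx
        have hxu : x < u.length := List.mem_range.mp hx
        congr 1
        rw [List.getD_eq_getElem?_getD, List.getD_eq_getElem?_getD,
            List.getElem?_append_left hxu]
      rw [hcg, ihu]
      simp
  rw [hsteps, pv_lemAlt t, htlen]

theorem pv_a_closed (n : Int) (s : String) (h0 : 0 ≤ n) (hle : n ≤ (s.toList.length : Int)) :
    funkcja n s = max 1 (pvCB (s.toList.take n.toNat) + pvBest (s.toList.take n.toNat)) := by
  set cs := s.toList with hcs
  set N := n.toNat with hN
  have hn : n = (N : Int) := by omega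
  have hNlen : N ≤ cs.length := by omega
  set t := cs.take N with ht
  have htlen : t.length = N := by simp [ht, hNlen]
  unfold funkcja
  rw [← hcs, hn]
  dsimp only
  rw [pv_lemA cs N hNlen, pv_lemB cs N hNlen]
  rw [show ((N : Int) + 1) = (((N + 1 : Nat)) : Int) by push_cast; ring, pv_lemFoldRange]
  try dsimp only
  have hsplitCount : ∀ i : Nat, pvCB (t.drop i) = pvCB t - pvCB (t.take i) := by
    intro i
    have hsp : t.count 'b' = (t.take i).count 'b' + (t.drop i).count 'b' := by
      conv_lhs => rw [← List.take_append_drop i t]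
      rw [List.count_append]
    simp only [pvCB, hsp]
    push_cast
    ring
  have hcongr : (List.range (N + 1)).foldl
      (fun k i =>
        if PySem.List.pyGetD ((List.range (N + 1)).map (fun i => pvCA (cs.take i))) ((i : Nat) : Int) 0
            + PySem.List.pyGetD (0 :: (List.range (N + 1)).map (fun j => pvCB (t.drop j))) (((i : Nat) : Int) + 1) 0 > k
        then PySem.List.pyGetD ((List.range (N + 1)).map (fun i => pvCA (cs.take i))) ((i : Nat) : Int) 0
            + PySem.List.pyGetD (0 :: (List.range (N + 1)).map (fun j => pvCB (t.drop j))) (((i : Nat) : Int) + 1) 0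
        else k) 1
      = (List.range (N + 1)).foldl
        (fun k i => if pvCB t + pvD t i > k then pvCB t + pvD t i else k) 1 := by
    apply PySem.List.foldl_congr_mem
    intro acc x hx
    have hxN : x < N + 1 := List.mem_range.mp hx
    have hA : PySem.List.pyGetD ((List.range (N + 1)).map (fun i => pvCA (cs.take i))) ((x : Nat) : Int) 0
        = pvCA (cs.take x) := by
      rw [PySem.List.pyGetD_natCast, List.getD_eq_getElem?_getD, List.getElem?_map,
          List.getElem?_range hxN]
      rfl
    have hB : PySem.List.pyGetD (0 :: (List.range (N + 1)).map (fun j => pvCB (t.drop j))) (((x : Nat) : Int) + 1) 0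
        = pvCB (t.drop x) := by
      rw [show (((x : Nat) : Int) + 1) = (((x + 1 : Nat)) : Int) by push_cast; ring,
          PySem.List.pyGetD_natCast, List.getD_cons_succ, List.getD_eq_getElem?_getD,
          List.getElem?_map, List.getElem?_range hxN]
      rfl
    have hval : pvCA (cs.take x) + pvCB (t.drop x) = pvCB t + pvD t x := by
      have hta : cs.take x = t.take x ∨ x ≥ N := by
        by_cases hxN' : x ≤ N
        · left; rw [ht, List.take_take]; congr 1; omega
        · right; omega
      rcases hta with hta | hge
      · rw [hta, hsplitCount x]; simp [pvD]; ring
      · have hx' : x = N := by omega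
        subst hx'
        rw [show cs.take N = t from ht.symm, hsplitCount N]
        simp [pvD]
        rw [← htlen]
        simp [List.take_of_length_le (le_refl t.length)]
        try ring
    rw [hA, hB, hval]
  rw [hcongr]
  have hfold : (List.range (N + 1)).foldl
      (fun k i => if pvCB t + pvD t i > k then pvCB t + pvD t i else k) 1
      = ((List.range (N + 1)).map (pvD t)).foldl
        (fun k x => if pvCB t + x > k then pvCB t + x else k) 1 := by
    rw [List.foldl_map]
  rw [hfold]
  have hd0 : pvD t 0 = 0 := by simp [pvD, pvCA, pvCB]
  rw [List.range_succ_eq_map, List.map_cons, List.foldl_cons, hd0]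
  have h1 : (if pvCB t + 0 > 1 then pvCB t + 0 else 1) = max 1 (pvCB t + 0) := by
    rcases le_total (pvCB t + 0) 1 with h | h <;> simp [max_def] <;> omega
  have hbest' : pvBest t = ((List.map Nat.succ (List.range N)).map (pvD t)).foldl
      (fun m x => max m x) 0 := by
    simp only [pvBest]
    rw [htlen, List.range_succ_eq_map, List.map_cons, List.foldl_cons, hd0]
    simp
  rw [h1, pv_lemMaxFold, hbest']

-- ===== VERDICT (by name: the statement is the Claim_ definition above) =====
theorem funkcja_spec : Claim_equal_funkcja := by
  intro n s _ hPre
  obtain ⟨h0, hle⟩ := hPre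
  unfold Spec_funkcja
  rw [pv_a_closed n s h0 hle, pv_alt_closed n s h0 hle]
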